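-- pv_equiv track=rewrite | github.com/hchiam/cognateLanguage | findCollisions.py | justTwoInitSylls_CVC
-- ===== SOURCE A (Python) =====
-- def justTwoInitSylls_CVC(word):
--     beforeThisIndex = 0
--     afterThisIndex = 0
--     for vowel1 in word:
--         if vowel1 in 'aeiou':
--             afterThisIndex = word.index(vowel1)
--             break
--     for vowel2 in word[afterThisIndex+1:]:
--         if vowel2 in 'aeiou':
--             beforeThisIndex = word[afterThisIndex+1:].index(vowel2)+1 + afterThisIndex+1
--             break
--     if beforeThisIndex!=0:
--         word = word[:beforeThisIndex+1]
--     return word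
-- ===== SOURCE B (Python) =====
-- def justTwoInitSylls_CVC(word):
--     count = 0
--     for i, ch in enumerate(word):
--         if ch in 'aeiou':
--             count += 1
--             if count == 2:
--                 return word[:i+2]
--     return word
-- ===== Notes on version B (the rewrite author's own statement) =====
-- stated objective: simpler
-- what changed: One enumerate pass with a vowel counter returning word[:i+2] at the second vowel, replacing A's two sequential scans plus the redundant word.index lookups and slice rebuilding.
import Mathlib
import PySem

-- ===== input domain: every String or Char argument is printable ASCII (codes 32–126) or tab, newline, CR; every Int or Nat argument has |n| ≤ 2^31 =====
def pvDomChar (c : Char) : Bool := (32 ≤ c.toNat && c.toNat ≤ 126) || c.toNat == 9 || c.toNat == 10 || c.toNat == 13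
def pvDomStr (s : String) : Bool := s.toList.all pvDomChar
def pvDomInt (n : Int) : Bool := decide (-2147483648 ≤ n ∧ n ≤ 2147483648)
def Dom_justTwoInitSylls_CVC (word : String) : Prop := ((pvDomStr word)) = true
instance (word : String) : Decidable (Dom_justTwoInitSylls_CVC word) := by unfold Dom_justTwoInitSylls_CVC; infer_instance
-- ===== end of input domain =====

-- B replaces A's two sequential scans (plus word.index/slice recomputation) by a single
-- enumerate pass with a vowel counter; objective: simpler.

-- ===== PORT A =====
-- 'vowel1 in "aeiou"' (substring test on a 1-char string)
def pvVowelTestA (c : Char) : Bool := PySem.Chars.isIn [c] ['a','e','i','o','u']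

-- first loop: scans chars; on the first vowel returns word.index(vowel1) (the vowel is in
-- word by construction, so index? is some; the getD 0 default is unreachable); 0 if no vowel
def pvLoopA1 (w : List Char) : List Char → Int
  | [] => 0
  | c :: rest =>
    if pvVowelTestA c then (((PySem.List.index? w c).getD 0 : Nat) : Int)
    else pvLoopA1 w rest

-- second loop over sl = word[afterThisIndex+1:]; same remark about index?
def pvLoopA2 (sl : List Char) (afterThisIndex : Int) : List Char → Int
  | [] => 0
  | c :: rest =>
    if pvVowelTestA c then
      (((PySem.List.index? sl c).getD 0 : Nat) : Int) + 1 + afterThisIndex + 1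
    else pvLoopA2 sl afterThisIndex rest

def justTwoInitSylls_CVC (word : String) : String :=
  let l := word.toList
  let afterThisIndex : Int := pvLoopA1 l l
  let sl := PySem.List.slice l (some (afterThisIndex + 1)) none
  let beforeThisIndex : Int := pvLoopA2 sl afterThisIndex sl
  if beforeThisIndex ≠ 0 then
    String.ofList (PySem.List.slice l none (some (beforeThisIndex + 1)))
  else word

-- ===== PORT B =====
-- single pass: i is the enumerate index, count the vowels seen so far
def pvGoB (w : List Char) : List Char → Int → Int → List Char
  | [], _, _ => w
  | c :: rest, i, count =>
    if ['a','e','i','o','u'].contains c then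
      if count + 1 = 2 then PySem.List.slice w none (some (i + 2))
      else pvGoB w rest (i + 1) (count + 1)
    else pvGoB w rest (i + 1) count

def justTwoInitSylls_CVC_alt (word : String) : String :=
  String.ofList (pvGoB word.toList word.toList 0 0)

-- ===== PRECONDITION & SPEC =====
def Spec_justTwoInitSylls_CVC (word : String) (out : String) : Prop := out = justTwoInitSylls_CVC_alt word
instance (word : String) (out : String) : Decidable (Spec_justTwoInitSylls_CVC word out) := by unfold Spec_justTwoInitSylls_CVC; infer_instance

-- ===== CLAIM (what is proved, stated in full; the proofs are below) =====
def Claim_equal_justTwoInitSylls_CVC : Prop := ∀ (word : String), Dom_justTwoInitSylls_CVC word → Spec_justTwoInitSylls_CVC word (justTwoInitSylls_CVC word)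

-- ===== LEMMAS AND PROOFS =====

-- the two membership tests agree ('c in "aeiou"' as substring vs list membership)
theorem pvVowelTestA_eq (c : Char) :
    pvVowelTestA c = ['a','e','i','o','u'].contains c := by
  unfold pvVowelTestA
  rcases Bool.eq_false_or_eq_true (['a','e','i','o','u'].contains c) with h | h <;> rw [h]
  · rw [PySem.Chars.isIn_iff_infix]
    have hc : c ∈ (['a','e','i','o','u'] : List Char) := by
      simpa [List.contains_iff_mem] using h
    obtain ⟨p, s, hps⟩ := List.mem_iff_append.mp hc
    rw [hps]
    exact ⟨p, s, by simp⟩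
  · rw [PySem.Chars.isIn_eq_false_iff]
    intro hinf
    have hc : c ∈ (['a','e','i','o','u'] : List Char) :=
      hinf.subset (List.mem_singleton.mpr rfl)
    have h2 := List.contains_iff_mem.mpr hc
    rw [h] at h2
    exact Bool.noConfusion h2

-- every list either has no vowel, or splits at its first vowel
theorem pvSplit (l : List Char) :
    (∀ x ∈ l, pvVowelTestA x = false) ∨
    ∃ p c s, l = p ++ c :: s ∧ (∀ x ∈ p, pvVowelTestA x = false) ∧ pvVowelTestA c = true := by
  induction l with
  | nil => exact Or.inl (by simp)
  | cons a t ih =>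
    by_cases ha : pvVowelTestA a = true
    · exact Or.inr ⟨[], a, t, by simp, by simp, ha⟩
    · have ha' : pvVowelTestA a = false := by simpa using ha
      rcases ih with h | ⟨p, c, s, hdec, hp, hc⟩
      · refine Or.inl ?_
        intro x hx
        rcases List.mem_cons.mp hx with rfl | hx
        · exact ha'
        · exact h x hx
      · refine Or.inr ⟨a :: p, c, s, by rw [hdec]; simp, ?_, hc⟩
        intro x hx
        rcases List.mem_cons.mp hx with rfl | hx
        · exact ha'
        · exact hp x hx

theorem pvLoopA1_free (w : List Char) (t : List Char) (h : ∀ x ∈ t, pvVowelTestA x = false) :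
    pvLoopA1 w t = 0 := by
  induction t with
  | nil => rfl
  | cons a r ih =>
    have ha := h a (by simp)
    rw [pvLoopA1, ha]
    simp only [Bool.false_eq_true, if_false]
    exact ih (fun x hx => h x (List.mem_cons_of_mem _ hx))

theorem pvLoopA1_found (w : List Char) (p : List Char) (c : Char) (s : List Char)
    (hp : ∀ x ∈ p, pvVowelTestA x = false) (hc : pvVowelTestA c = true) :
    pvLoopA1 w (p ++ c :: s) = (((PySem.List.index? w c).getD 0 : Nat) : Int) := by
  induction p with
  | nil => rw [List.nil_append, pvLoopA1, hc]; simp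
  | cons a r ih =>
    have ha := hp a (by simp)
    rw [List.cons_append, pvLoopA1, ha]
    simp only [Bool.false_eq_true, if_false]
    exact ih (fun x hx => hp x (List.mem_cons_of_mem _ hx))

theorem pvLoopA2_free (sl : List Char) (a : Int) (t : List Char)
    (h : ∀ x ∈ t, pvVowelTestA x = false) : pvLoopA2 sl a t = 0 := by
  induction t with
  | nil => rfl
  | cons x r ih =>
    have hx := h x (by simp)
    rw [pvLoopA2, hx]
    simp only [Bool.false_eq_true, if_false]
    exact ih (fun y hy => h y (List.mem_cons_of_mem _ hy))

theorem pvLoopA2_found (sl : List Char) (a : Int) (p : List Char) (c : Char) (s : List Char)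
    (hp : ∀ x ∈ p, pvVowelTestA x = false) (hc : pvVowelTestA c = true) :
    pvLoopA2 sl a (p ++ c :: s) = (((PySem.List.index? sl c).getD 0 : Nat) : Int) + 1 + a + 1 := by
  induction p with
  | nil => rw [List.nil_append, pvLoopA2, hc]; simp
  | cons x r ih =>
    have hx := hp x (by simp)
    rw [List.cons_append, pvLoopA2, hx]
    simp only [Bool.false_eq_true, if_false]
    exact ih (fun y hy => hp y (List.mem_cons_of_mem _ hy))

-- first occurrence of the first vowel is its position
theorem pvIndex_first (p : List Char) (c : Char) (s : List Char)
    (hp : ∀ x ∈ p, pvVowelTestA x = false) (hc : pvVowelTestA c = true) :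
    PySem.List.index? (p ++ c :: s) c = some p.length := by
  rw [PySem.List.index?_eq_some_iff]
  exact ⟨p, s, rfl, rfl, fun hmem => by simpa [hc] using hp c hmem⟩

theorem pvGoB_free (w : List Char) (t : List Char) (i count : Int)
    (h : ∀ x ∈ t, pvVowelTestA x = false) : pvGoB w t i count = w := by
  induction t generalizing i count with
  | nil => rfl
  | cons a r ih =>
    have ha := h a (by simp)
    rw [pvVowelTestA_eq] at ha
    rw [pvGoB, ha]
    simp only [Bool.false_eq_true, if_false]
    exact ih _ _ (fun x hx => h x (List.mem_cons_of_mem _ hx))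

theorem pvGoB_skip (w : List Char) (p t : List Char) (i count : Int)
    (hp : ∀ x ∈ p, pvVowelTestA x = false) :
    pvGoB w (p ++ t) i count = pvGoB w t (i + p.length) count := by
  induction p generalizing i with
  | nil => simp
  | cons a r ih =>
    have ha := hp a (by simp)
    rw [pvVowelTestA_eq] at ha
    rw [List.cons_append, pvGoB, ha]
    simp only [Bool.false_eq_true, if_false]
    rw [ih _ (fun x hx => hp x (List.mem_cons_of_mem _ hx))]
    congr 1
    simp only [List.length_cons]
    push_cast
    omega

theorem pvGoB_vowel_step (w rest : List Char) (c : Char) (i count : Int)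
    (h : (['a','e','i','o','u'] : List Char).contains c = true) (h2 : count + 1 ≠ 2) :
    pvGoB w (c :: rest) i count = pvGoB w rest (i+1) (count+1) := by
  rw [pvGoB, h, if_pos rfl, if_neg h2]

theorem pvGoB_vowel_second (w rest : List Char) (c : Char) (i count : Int)
    (h : (['a','e','i','o','u'] : List Char).contains c = true) (h2 : count + 1 = 2) :
    pvGoB w (c :: rest) i count = PySem.List.slice w none (some (i + 2)) := by
  rw [pvGoB, h, if_pos rfl, if_pos h2]

-- drop past the prefix-and-one-char
theorem pvDrop_split (p : List Char) (c : Char) (s : List Char) :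
    (p ++ c :: s).drop (p.length + 1) = s := by
  have h : p ++ c :: s = (p ++ [c]) ++ s := by simp
  rw [h]
  have hl : (p ++ [c]).length = p.length + 1 := by simp
  rw [← hl, List.drop_left]

theorem pvMain (word : String) : justTwoInitSylls_CVC word = justTwoInitSylls_CVC_alt word := by
  simp only [justTwoInitSylls_CVC, justTwoInitSylls_CVC_alt]
  rcases pvSplit word.toList with hfree | ⟨p, c, s, hdec, hp, hc⟩
  · -- no vowel at all: both return word
    rw [pvLoopA1_free _ _ hfree]
    have hsl : PySem.List.slice word.toList (some ((0:Int) + 1)) none = word.toList.drop 1 := by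
      rw [show ((0:Int)+1) = ((1:Nat):Int) by norm_num, PySem.List.slice_from_natCast]
    rw [hsl, pvLoopA2_free _ _ _ (fun x hx => hfree x (List.drop_subset _ _ hx))]
    rw [pvGoB_free _ _ _ _ hfree]
    simp
  · -- first vowel at position p.length
    have h1 : pvLoopA1 word.toList word.toList = (p.length : Int) := by
      rw [hdec, pvLoopA1_found _ p c s hp hc, pvIndex_first p c s hp hc]
      simp
    rw [h1]
    have hsl : PySem.List.slice word.toList (some ((p.length : Int) + 1)) none = s := by
      rw [show ((p.length:Int)+1) = (((p.length+1 : Nat)):Int) by push_cast; ring,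
        PySem.List.slice_from_natCast, hdec, pvDrop_split]
    rw [hsl]
    have hc' : (['a','e','i','o','u'] : List Char).contains c = true := by
      rw [← pvVowelTestA_eq]; exact hc
    have hBstart : pvGoB word.toList word.toList 0 0
        = pvGoB word.toList s ((p.length : Int) + 1) 1 := by
      conv_lhs => rw [hdec]
      rw [pvGoB_skip _ p (c :: s) 0 0 hp,
        pvGoB_vowel_step _ _ _ _ _ hc' (by norm_num), ← hdec]
      norm_num
    rcases pvSplit s with hfree2 | ⟨q, d, r, hdec2, hq, hd⟩
    · -- only one vowel: both return word
      rw [pvLoopA2_free _ _ _ hfree2]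
      rw [hBstart, pvGoB_free _ _ _ _ hfree2]
      simp
    · -- second vowel at position p.length + 1 + q.length
      have h2 : pvLoopA2 s (p.length : Int) s
          = (q.length : Int) + 1 + (p.length : Int) + 1 := by
        rw [hdec2, pvLoopA2_found _ _ q d r hq hd, pvIndex_first q d r hq hd]
        simp
      rw [h2, if_pos (by positivity)]
      have hd' : (['a','e','i','o','u'] : List Char).contains d = true := by
        rw [← pvVowelTestA_eq]; exact hd
      rw [hBstart]
      conv_rhs => rw [hdec2]
      rw [pvGoB_skip _ q (d :: r) _ _ hq,
        pvGoB_vowel_second _ _ _ _ _ hd' (by norm_num)]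
      congr 3
      omega

-- ===== VERDICT (by name: the statement is the Claim_ definition above) =====
theorem justTwoInitSylls_CVC_spec : Claim_equal_justTwoInitSylls_CVC := by
  intro word _
  unfold Spec_justTwoInitSylls_CVC
  exact pvMain word
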